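-- pv_equiv track=rewrite | github.com/Djhekto/Univ_Code | zz_low_quality/python_kyrs_5sem/ptal/zp/dlen.py | verni_step_10
-- ===== SOURCE A (Python) =====
-- def verni_step_10(chislo):
--     chislo = chislo - 1# eto debug na sluchai step 10
--     str1 = str(chislo)
--     temp = len(str1)-1
-- #    str1 = ["1"]+["0" for elem in range(temp)]
--     str1 = "1"
--     for elem in range(temp):
--         str1=str1+"0"
--     return int(str1)
-- ===== SOURCE B (Python) =====
-- def verni_step_10(chislo):
--     # closed-form: len(str(chislo - 1)) - 1 zeros after a leading 1 is exactly 10 ** that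
--     return 10 ** (len(str(chislo - 1)) - 1)
-- ===== Notes on version B (the rewrite author's own statement) =====
-- stated objective: simpler
-- what changed: replaces the digit-by-digit string construction ('1' plus a loop appending '0') followed by int() with the closed-form value 10 ** (len(str(chislo - 1)) - 1)
import Mathlib
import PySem

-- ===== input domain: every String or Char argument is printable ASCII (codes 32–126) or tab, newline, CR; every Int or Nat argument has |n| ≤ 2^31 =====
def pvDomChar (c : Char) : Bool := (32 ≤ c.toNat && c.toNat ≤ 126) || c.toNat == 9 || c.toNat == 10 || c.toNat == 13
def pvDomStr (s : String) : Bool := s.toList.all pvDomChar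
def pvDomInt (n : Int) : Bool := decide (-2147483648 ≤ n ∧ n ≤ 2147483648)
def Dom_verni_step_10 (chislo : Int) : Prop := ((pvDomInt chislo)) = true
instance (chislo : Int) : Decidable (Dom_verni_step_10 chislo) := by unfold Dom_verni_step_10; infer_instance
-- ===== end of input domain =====

-- B replaces A's loop that builds the string "1" + "0"*temp and parses it with int()
-- by the closed-form value 10 ** temp (temp = len(str(chislo-1)) - 1 kept exactly); objective: simpler.


-- ===== PORT A =====
-- str handled at the PySem.Chars (List Char) level; int(str1) is PySem.Int.ofChars?,
-- always `some` here (the string is "1" followed by zeros), so `.getD 0` is never used.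
def verni_step_10 (chislo : Int) : Int :=
  let chislo := chislo - 1
  let str1 := PySem.Int.toChars chislo
  let temp : Int := (str1.length : Int) - 1
  let str1 := (PySem.List.pyRange 0 temp 1).foldl (fun s _ => s ++ ['0']) ['1']
  (PySem.Int.ofChars? str1).getD 0

-- ===== PORT B =====
def verni_step_10_alt (chislo : Int) : Int :=
  (10 : Int) ^ ((PySem.Int.toChars (chislo - 1)).length - 1)

-- ===== PRECONDITION & SPEC =====
def Spec_verni_step_10 (chislo : Int) (out : Int) : Prop := out = verni_step_10_alt chislo
instance (chislo : Int) (out : Int) : Decidable (Spec_verni_step_10 chislo out) := by unfold Spec_verni_step_10; infer_instance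

-- ===== CLAIM (what is proved, stated in full; the proofs are below) =====
def Claim_equal_verni_step_10 : Prop := ∀ (chislo : Int), Dom_verni_step_10 chislo → Spec_verni_step_10 chislo (verni_step_10 chislo)

-- ===== LEMMAS AND PROOFS =====

-- on the domain, str(chislo - 1) has between 1 and 11 characters
theorem len_toChars_bounds (m : Int) (h1 : -2147483649 ≤ m) (h2 : m ≤ 2147483647) :
    1 ≤ (PySem.Int.toChars m).length ∧ (PySem.Int.toChars m).length ≤ 11 := by
  unfold PySem.Int.toChars
  split_ifs with hneg
  · have : (Nat.toDigits 10 m.natAbs).length ≤ 10 :=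
      (Nat.length_toDigits_le_iff (by omega) (by omega)).mpr (by omega)
    simp only [List.length_cons]
    omega
  · have : (Nat.toDigits 10 m.toNat).length ≤ 10 :=
      (Nat.length_toDigits_le_iff (by omega) (by omega)).mpr (by omega)
    have := @Nat.length_toDigits_pos 10 m.toNat
    omega

-- the parsed "1" + "0"*(n-1) string is 10^(n-1), for every feasible length n
theorem parse_one_zeros (n : Nat) (h1 : 1 ≤ n) (h2 : n ≤ 11) :
    (PySem.Int.ofChars? ((PySem.List.pyRange 0 ((n : Int) - 1) 1).foldl
        (fun s _ => s ++ ['0']) ['1'])).getD 0 = (10 : Int) ^ (n - 1) := by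
  interval_cases n <;> decide

-- ===== VERDICT (by name: the statement is the Claim_ definition above) =====
theorem verni_step_10_spec : Claim_equal_verni_step_10 := by
  intro chislo hdom
  have hd : -2147483648 ≤ chislo ∧ chislo ≤ 2147483648 := by
    simpa [Dom_verni_step_10, pvDomInt] using hdom
  obtain ⟨hb1, hb2⟩ := len_toChars_bounds (chislo - 1) (by omega) (by omega)
  show verni_step_10 chislo = verni_step_10_alt chislo
  unfold verni_step_10 verni_step_10_alt
  exact parse_one_zeros ((PySem.Int.toChars (chislo - 1)).length) hb1 hb2
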